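-- pv_equiv track=rewrite | github.com/OpenFn/apollo | services/global_agent/tests/test_utils.py | path_matches
-- ===== SOURCE A (Python) =====
-- def path_matches(path, allowed_paths):
--     """Check if a path (list of keys) matches any allowed path pattern."""
--     for allowed in allowed_paths:
--         allowed_parts = allowed.split('.')
--         if len(path) != len(allowed_parts):
--             continue
--         match = True
--         for p, a in zip(path, allowed_parts):
--             if a == '*':
--                 continue
--             if p != a:
--                 match = False
--                 break
--         if match:
--             return True
--     return False
-- ===== SOURCE B (Python) =====
-- def path_matches(path, allowed_paths):
--     """Check if a path (list of keys) matches any allowed path pattern.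
--
--     Level-by-level frontier filtering: keep the set of still-viable split
--     patterns and narrow it once per path element, instead of testing each
--     pattern in full one after another.
--     """
--     frontier = [parts for parts in (a.split('.') for a in allowed_paths)
--                 if len(parts) == len(path)]
--     for key in path:
--         frontier = [c[1:] for c in frontier if c[0] == '*' or c[0] == key]
--     return bool(frontier)
-- ===== Notes on version B (the rewrite author's own statement) =====
-- stated objective: alternative
-- what changed: B replaces A's per-pattern nested scan (loop over patterns, inner loop with a match flag and break) by a single level-by-level descent: it keeps a frontier of still-viable split patterns and filters it once per path element, returning whether the frontier is nonempty.
import Mathlib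
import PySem

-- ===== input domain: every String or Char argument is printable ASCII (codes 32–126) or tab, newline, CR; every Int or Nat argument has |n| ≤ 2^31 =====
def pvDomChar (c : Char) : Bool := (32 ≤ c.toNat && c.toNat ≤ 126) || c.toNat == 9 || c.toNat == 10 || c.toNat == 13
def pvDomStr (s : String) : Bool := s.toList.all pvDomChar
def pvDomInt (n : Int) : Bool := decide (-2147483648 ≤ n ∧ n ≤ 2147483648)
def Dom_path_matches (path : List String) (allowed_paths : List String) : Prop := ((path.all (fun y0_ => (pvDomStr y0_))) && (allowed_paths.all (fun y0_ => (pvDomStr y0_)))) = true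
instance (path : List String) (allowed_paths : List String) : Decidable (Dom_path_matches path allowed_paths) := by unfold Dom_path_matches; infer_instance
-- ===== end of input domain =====

-- B replaces A's per-pattern nested scan by a level-by-level frontier filtering
-- over the split patterns (alternative decomposition, same asymptotic cost).

-- ===== PORT A =====
-- s.split('.') — sep "." is nonempty, so split? always returns some
def pySplitDot (s : String) : List String := (PySem.Str.split? s ".").getD []

-- inner `for p, a in zip(path, allowed_parts)` loop with the `match` flag and break
def pvInnerA : List (String × String) → Bool
  | [] => true
  | (p, a) :: t => if a == "*" then pvInnerA t else if p != a then false else pvInnerA t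

def path_matches (path : List String) (allowed_paths : List String) : Bool :=
  match allowed_paths with
  | [] => false
  | allowed :: rest =>
    let allowed_parts := pySplitDot allowed
    if path.length != allowed_parts.length then path_matches path rest
    else if pvInnerA (path.zip allowed_parts) then true
    else path_matches path rest

-- ===== PORT B =====
-- one filtering step: `[c[1:] for c in frontier if c[0] == '*' or c[0] == key]`
-- (Python's c[0] would raise on an empty c; that case is unreachable because every
--  frontier element's length equals the number of path elements still to process)
def pvStepB (key : String) (fr : List (List String)) : List (List String) :=
  fr.filterMap (fun c => match c with
    | [] => none
    | h :: t => if h == "*" || h == key then some t else none)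

def path_matches_alt (path : List String) (allowed_paths : List String) : Bool :=
  let frontier := (allowed_paths.map (fun a => pySplitDot a)).filter
      (fun parts => parts.length == path.length)
  let final := path.foldl (fun fr key => pvStepB key fr) frontier
  !final.isEmpty

-- ===== PRECONDITION & SPEC =====
def Spec_path_matches (path : List String) (allowed_paths : List String) (out : Bool) : Prop := out = path_matches_alt path allowed_paths
instance (path : List String) (allowed_paths : List String) (out : Bool) : Decidable (Spec_path_matches path allowed_paths out) := by unfold Spec_path_matches; infer_instance

-- ===== CLAIM (what is proved, stated in full; the proofs are below) =====
def Claim_equal_path_matches : Prop := ∀ (path : List String) (allowed_paths : List String), Dom_path_matches path allowed_paths → Spec_path_matches path allowed_paths (path_matches path allowed_paths)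

-- ===== LEMMAS AND PROOFS =====

/-- The common matching relation: equal length, and each pattern segment is `*`
or equals the path segment. -/
def matchesL : List String → List String → Bool
  | [], [] => true
  | k :: ks, h :: t => (h == "*" || h == k) && matchesL ks t
  | _, _ => false

theorem innerA_eq (path parts : List String) (h : path.length = parts.length) :
    pvInnerA (path.zip parts) = matchesL path parts := by
  induction path generalizing parts with
  | nil => cases parts with
    | nil => rfl
    | cons a t => simp at h
  | cons p ps ih =>
    cases parts with
    | nil => simp at h
    | cons a t =>
      simp only [List.length_cons, Nat.add_right_cancel_iff] at h
      simp only [List.zip_cons_cons, pvInnerA, matchesL]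
      by_cases ha : a = "*"
      · simp [ha, ih t h]
      · by_cases hpa : p = a
        · simp [ha, hpa, ih t h]
        · simp [ha, hpa, Ne.symm hpa, bne_iff_ne]

theorem pathA_iff (path allowed_paths : List String) :
    path_matches path allowed_paths = true ↔
      ∃ a ∈ allowed_paths, (pySplitDot a).length = path.length ∧
        matchesL path (pySplitDot a) = true := by
  induction allowed_paths with
  | nil => simp [path_matches]
  | cons a rest ih =>
    simp only [path_matches]
    by_cases hlen : path.length = (pySplitDot a).length
    · rw [innerA_eq path _ hlen]
      by_cases hm : matchesL path (pySplitDot a) = true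
      · simp [hlen, hm]
      · simp [hlen, hm, ih]
    · have : (path.length != (pySplitDot a).length) = true := by
        simp [bne_iff_ne, hlen]
      simp only [this, if_true, ih]
      constructor
      · rintro ⟨b, hb, hlb, hmb⟩; exact ⟨b, List.mem_cons_of_mem _ hb, hlb, hmb⟩
      · rintro ⟨b, hb, hlb, hmb⟩
        rcases List.mem_cons.mp hb with rfl | hb
        · exact absurd hlb.symm hlen
        · exact ⟨b, hb, hlb, hmb⟩

theorem loopB_iff (path : List String) (fr : List (List String))
    (hlen : ∀ c ∈ fr, c.length = path.length) :
    ((path.foldl (fun fr key => pvStepB key fr) fr).isEmpty = false ↔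
      ∃ c ∈ fr, matchesL path c = true) := by
  induction path generalizing fr with
  | nil =>
    simp only [List.foldl_nil, List.isEmpty_eq_false_iff, ← List.length_pos_iff]
    constructor
    · intro h
      rcases List.exists_mem_of_length_pos h with ⟨c, hc⟩
      have : c = [] := List.eq_nil_of_length_eq_zero (hlen c hc)
      exact ⟨c, hc, by simp [this, matchesL]⟩
    · rintro ⟨c, hc, -⟩; exact List.length_pos_of_mem hc
  | cons k ks ih =>
    simp only [List.foldl_cons]
    have hlen' : ∀ c ∈ pvStepB k fr, c.length = ks.length := by
      intro c hc
      rcases List.mem_filterMap.mp hc with ⟨d, hd, hsome⟩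
      cases d with
      | nil => simp at hsome
      | cons h t =>
        by_cases hcond : (h == "*" || h == k) = true
        · simp only [hcond, if_true, Option.some.injEq] at hsome
          subst hsome
          have := hlen (h :: t) hd
          simpa using this
        · simp [hcond] at hsome
    rw [ih (pvStepB k fr) hlen']
    constructor
    · rintro ⟨c', hc', hm⟩
      rcases List.mem_filterMap.mp hc' with ⟨d, hd, hsome⟩
      cases d with
      | nil => simp at hsome
      | cons h t =>
        by_cases hcond : (h == "*" || h == k) = true
        · simp only [hcond, if_true, Option.some.injEq] at hsome
          subst hsome
          exact ⟨h :: t, hd, by simp [matchesL, hcond, hm]⟩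
        · simp [hcond] at hsome
    · rintro ⟨c, hc, hm⟩
      cases c with
      | nil => have := hlen [] hc; simp at this
      | cons h t =>
        simp only [matchesL, Bool.and_eq_true] at hm
        refine ⟨t, List.mem_filterMap.mpr ⟨h :: t, hc, ?_⟩, hm.2⟩
        simp [hm.1]

theorem pathB_iff (path allowed_paths : List String) :
    path_matches_alt path allowed_paths = true ↔
      ∃ a ∈ allowed_paths, (pySplitDot a).length = path.length ∧
        matchesL path (pySplitDot a) = true := by
  unfold path_matches_alt
  simp only [Bool.not_eq_true']
  rw [loopB_iff]
  · constructor
    · rintro ⟨c, hc, hm⟩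
      rcases List.mem_filter.mp hc with ⟨hc, hlenc⟩
      rcases List.mem_map.mp hc with ⟨a, ha, rfl⟩
      exact ⟨a, ha, by simpa using hlenc, hm⟩
    · rintro ⟨a, ha, hlena, hm⟩
      refine ⟨pySplitDot a, List.mem_filter.mpr ⟨List.mem_map.mpr ⟨a, ha, rfl⟩, by simpa using hlena⟩, hm⟩
  · intro c hc
    exact of_decide_eq_true (List.mem_filter.mp hc).2

-- ===== VERDICT (by name: the statement is the Claim_ definition above) =====
theorem path_matches_spec : Claim_equal_path_matches := by
  intro path allowed_paths _
  unfold Spec_path_matches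
  rw [Bool.eq_iff_iff, pathA_iff, pathB_iff]
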